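-- pv_equiv track=rewrite | github.com/koeppben23/ai_files | governance_runtime/entrypoints/phase5_plan_record_persist.py | _canonicalize_text
-- ===== SOURCE A (Python) =====
-- def _canonicalize_text(raw: str) -> str:
--     text = raw.replace("\r\n", "\n").replace("\r", "\n")
--     lines = [line.rstrip() for line in text.split("\n")]
--     while lines and not lines[0].strip():
--         lines.pop(0)
--     while lines and not lines[-1].strip():
--         lines.pop()
--     return "\n".join(lines).strip()
-- ===== SOURCE B (Python) =====
-- def _canonicalize_text(raw: str) -> str:
--     text = raw.replace("\r\n", "\n").replace("\r", "\n")
--     return "\n".join(line.rstrip() for line in text.split("\n")).strip()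
-- ===== Notes on version B (the rewrite author's own statement) =====
-- stated objective: simpler
-- what changed: Removes both edge-popping while-loops entirely: after per-line rstrip, blank edge lines are provably absorbed by the final strip applied to the newline-joined lines, so B is a single join-then-strip expression.
import Mathlib
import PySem

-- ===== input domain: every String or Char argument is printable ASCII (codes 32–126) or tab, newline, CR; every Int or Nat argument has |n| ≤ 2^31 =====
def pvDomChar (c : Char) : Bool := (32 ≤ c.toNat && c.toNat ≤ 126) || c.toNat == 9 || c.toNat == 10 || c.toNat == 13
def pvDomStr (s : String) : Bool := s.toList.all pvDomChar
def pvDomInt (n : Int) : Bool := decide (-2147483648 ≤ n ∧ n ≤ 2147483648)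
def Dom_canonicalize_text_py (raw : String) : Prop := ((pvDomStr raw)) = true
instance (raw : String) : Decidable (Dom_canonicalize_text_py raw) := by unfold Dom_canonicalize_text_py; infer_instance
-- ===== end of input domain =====

-- B drops A's two edge-popping while-loops: the final strip after joining provably removes blank edge lines (objective: simpler).


-- ===== PORT A =====
-- while lines and not lines[0].strip(): lines.pop(0)
def pvDropFrontA : List String → List String
  | [] => []
  | l :: rest => if PySem.Str.strip l == "" then pvDropFrontA rest else l :: rest

-- while lines and not lines[-1].strip(): lines.pop()
def pvDropBackA (ls : List String) : List String :=
  match _h : ls.getLast? with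
  | none => ls
  | some l =>
    if PySem.Str.strip l == "" then pvDropBackA ls.dropLast else ls
termination_by ls.length
decreasing_by
  cases ls with
  | nil => simp at _h
  | cons a t => simp [List.length_dropLast]

def canonicalize_text_py (raw : String) : String :=
  let text := PySem.Str.replace (PySem.Str.replace raw "\r\n" "\n") "\r" "\n"
  let lines := ((PySem.Str.split? text "\n").getD []).map PySem.Str.rstrip
  PySem.Str.strip (PySem.Str.join "\n" (pvDropBackA (pvDropFrontA lines)))

-- ===== PORT B =====
def canonicalize_text_py_alt (raw : String) : String :=
  let text := PySem.Str.replace (PySem.Str.replace raw "\r\n" "\n") "\r" "\n"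
  PySem.Str.strip (PySem.Str.join "\n"
    (((PySem.Str.split? text "\n").getD []).map PySem.Str.rstrip))

-- ===== PRECONDITION & SPEC =====
def Spec_canonicalize_text_py (raw : String) (out : String) : Prop := out = canonicalize_text_py_alt raw
instance (raw : String) (out : String) : Decidable (Spec_canonicalize_text_py raw out) := by unfold Spec_canonicalize_text_py; infer_instance

-- ===== CLAIM (what is proved, stated in full; the proofs are below) =====
def Claim_equal_canonicalize_text_py : Prop := ∀ (raw : String), Dom_canonicalize_text_py raw → Spec_canonicalize_text_py raw (canonicalize_text_py raw)

-- ===== LEMMAS AND PROOFS =====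

-- all-whitespace prefix is absorbed by lstrip
theorem pv_lstrip_ws_append (a b : List Char) (h : ∀ c ∈ a, PySem.Chars.isspace c = true) :
    PySem.Chars.lstrip (a ++ b) = PySem.Chars.lstrip b := by
  simp only [PySem.Chars.lstrip, List.dropWhile_append, List.dropWhile_eq_nil_iff.mpr h,
    List.isEmpty_nil, if_true]

-- all-whitespace suffix is absorbed by rstrip
theorem pv_rstrip_append_ws (b a : List Char) (h : ∀ c ∈ a, PySem.Chars.isspace c = true) :
    PySem.Chars.rstrip (b ++ a) = PySem.Chars.rstrip b := by
  simp only [PySem.Chars.rstrip, List.reverse_append]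
  rw [show List.dropWhile PySem.Chars.isspace (a.reverse ++ b.reverse)
        = PySem.Chars.lstrip (a.reverse ++ b.reverse) from rfl,
      pv_lstrip_ws_append _ _ (by simpa using h)]
  rfl

theorem pv_strip_ws_append (a b : List Char) (h : ∀ c ∈ a, PySem.Chars.isspace c = true) :
    PySem.Chars.strip (a ++ b) = PySem.Chars.strip b := by
  simp only [PySem.Chars.strip, pv_lstrip_ws_append a b h]

theorem pv_strip_append_ws (b a : List Char) (h : ∀ c ∈ a, PySem.Chars.isspace c = true) :
    PySem.Chars.strip (b ++ a) = PySem.Chars.strip b := by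
  simp only [PySem.Chars.strip, PySem.Chars.lstrip, List.dropWhile_append]
  split_ifs with he
  · rw [List.dropWhile_eq_nil_iff.mpr h, List.isEmpty_iff.mp he]
  · exact pv_rstrip_append_ws _ _ h

-- strip l = "" means every char of l is whitespace
theorem pv_strip_empty_all_ws (l : String) (h : (PySem.Str.strip l == "") = true) :
    ∀ c ∈ l.toList, PySem.Chars.isspace c = true := by
  have h' : PySem.Chars.strip l.toList = [] := by
    have := beq_iff_eq.mp h
    have := congrArg String.toList this
    simpa [PySem.Str.toList_strip] using this
  have hl : ∀ c ∈ PySem.Chars.lstrip l.toList, PySem.Chars.isspace c = true := by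
    have : (PySem.Chars.lstrip l.toList).reverse.dropWhile PySem.Chars.isspace = [] := by
      have h2 : ((PySem.Chars.lstrip l.toList).reverse.dropWhile PySem.Chars.isspace).reverse = [] := h'
      simpa using congrArg List.reverse h2
    intro c hc
    exact List.dropWhile_eq_nil_iff.mp this c (by simpa using hc)
  intro c hc
  rcases (List.takeWhile_append_dropWhile (p := PySem.Chars.isspace) (l := l.toList)) ▸ hc with hc'
  rw [← List.takeWhile_append_dropWhile (p := PySem.Chars.isspace) (l := l.toList)] at hc
  rcases List.mem_append.mp hc with h1 | h2
  · exact List.mem_takeWhile_imp h1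
  · exact hl c h2

-- join over a cons splits off "line\n"
theorem pv_join_cons (l : String) (rest : List String) (hr : rest ≠ []) :
    PySem.Chars.join "\n".toList (List.map String.toList (l :: rest))
      = (l.toList ++ ['\n']) ++ PySem.Chars.join "\n".toList (List.map String.toList rest) := by
  cases rest with
  | nil => exact absurd rfl hr
  | cons r t =>
    simp [PySem.Chars.join_cons_cons]

-- join over an appended last element
theorem pv_join_concat (ls : List String) (l : String) (hl : ls ≠ []) :
    PySem.Chars.join "\n".toList (List.map String.toList (ls ++ [l]))
      = PySem.Chars.join "\n".toList (List.map String.toList ls) ++ (['\n'] ++ l.toList) := by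
  induction ls with
  | nil => exact absurd rfl hl
  | cons a t ih =>
    cases t with
    | nil => simp [PySem.Chars.join_cons_cons, PySem.Chars.join_singleton]
    | cons b u =>
      rw [List.cons_append, pv_join_cons a ((b :: u) ++ [l]) (by simp),
          pv_join_cons a (b :: u) (by simp), ih (by simp)]
      simp

-- dropping the front blank lines does not change the stripped join
theorem pv_front_ok (ls : List String) :
    PySem.Chars.strip ((PySem.Str.join "\n" (pvDropFrontA ls)).toList)
      = PySem.Chars.strip ((PySem.Str.join "\n" ls).toList) := by
  induction ls with
  | nil => rfl
  | cons l rest ih =>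
    by_cases hb : (PySem.Str.strip l == "") = true
    · have hws := pv_strip_empty_all_ws l hb
      rw [show pvDropFrontA (l :: rest) = pvDropFrontA rest by simp [pvDropFrontA, hb], ih]
      cases rest with
      | nil =>
        simp only [PySem.Str.toList_join, List.map, PySem.Chars.join_singleton, PySem.Chars.join_nil]
        rw [show l.toList = l.toList ++ ([] : List Char) by simp, pv_strip_ws_append _ _ hws]
      | cons r t =>
        have hws' : ∀ c ∈ l.toList ++ ['\n'], PySem.Chars.isspace c = true := by
          intro c hc
          rcases List.mem_append.mp hc with h1 | h2
          · exact hws c h1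
          · simp at h2; subst h2; decide
        rw [PySem.Str.toList_join, PySem.Str.toList_join,
            pv_join_cons l (r :: t) (by simp),
            pv_strip_ws_append _ _ hws']
    · simp only [pvDropFrontA, if_neg hb]

theorem pvDropBackA_concat (ls : List String) (l : String) :
    pvDropBackA (ls ++ [l]) = if PySem.Str.strip l == "" then pvDropBackA ls else ls ++ [l] := by
  rw [pvDropBackA]
  split
  · next h => simp at h
  · next x h =>
    rw [List.getLast?_concat] at h
    cases h
    rw [List.dropLast_concat]

-- dropping the back blank lines does not change the stripped join
theorem pv_back_ok (ls : List String) :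
    PySem.Chars.strip ((PySem.Str.join "\n" (pvDropBackA ls)).toList)
      = PySem.Chars.strip ((PySem.Str.join "\n" ls).toList) := by
  induction ls using List.reverseRecOn with
  | nil => rw [show pvDropBackA [] = [] by rw [pvDropBackA]; rfl]
  | append_singleton init l ih =>
    rw [pvDropBackA_concat]
    by_cases hb : (PySem.Str.strip l == "") = true
    · have hws := pv_strip_empty_all_ws l hb
      rw [if_pos hb, ih]
      cases init with
      | nil =>
        simp only [List.nil_append, PySem.Str.toList_join, List.map, PySem.Chars.join_singleton,
          PySem.Chars.join_nil]
        rw [← List.append_nil l.toList, pv_strip_ws_append _ _ hws]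
      | cons a t =>
        have hws' : ∀ c ∈ ['\n'] ++ l.toList, PySem.Chars.isspace c = true := by
          intro c hc
          rcases List.mem_append.mp hc with h1 | h2
          · simp at h1; subst h1; decide
          · exact hws c h2
        rw [PySem.Str.toList_join, PySem.Str.toList_join,
            pv_join_concat (a :: t) l (by simp),
            pv_strip_append_ws _ _ hws']
    · rw [if_neg hb]

-- ===== VERDICT (by name: the statement is the Claim_ definition above) =====
theorem canonicalize_text_py_spec : Claim_equal_canonicalize_text_py := by
  intro raw _
  unfold Spec_canonicalize_text_py canonicalize_text_py canonicalize_text_py_alt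
  apply String.toList_inj.mp
  rw [PySem.Str.toList_strip, PySem.Str.toList_strip, pv_back_ok, pv_front_ok]
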